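-- pv_equiv track=rewrite | github.com/Yash9988/self-learn | leetcode/1671.py | minimumMountainRemovals_alt
-- ===== SOURCE A (Python) =====
-- def minimumMountainRemovals_alt(nums: list[int]) -> int:
--     n = len(nums)                                               # Compute the length of the input list
--     dp1, dp2 = [1] * n, [1] * n                                 # Initialise 2 DPs
--     for i in range(1, n):                                       # Iterate through the nums, starting at index 1
--         for j in range(i):                                      # Iterate to the curr-idx
--             if nums[j] < nums[i]:                               # Check if prev-num is smaller than curr-num
--                 dp1[i] = max(dp1[i], 1 + dp1[j])                # Update DP1 with max-val
--
--             if nums[j] > nums[i]:                               # Check if pre-num is greater than curr-num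
--                 if dp1[j] > 1:                                  # Check if prev-num is greater than one
--                     dp2[i] = max(dp2[i], 1 + dp1[j])            # Update DP2 with max-val w/ DP1
--
--                 if dp2[j] > 1:                                  # Check if prev-num is smaller than one
--                     dp2[i] = max(dp2[i], 1 + dp2[j])            # Update the DP2 with max-val
--
--     return n - max(dp2)                                         # Compute and return the result
-- ===== SOURCE B (Python) =====
-- def minimumMountainRemovals_alt(nums: list[int]) -> int:
--     n = len(nums)
--     inc = [1] * n                        # longest strictly increasing subsequence ending at i
--     for i in range(n):
--         for j in range(i):
--             if nums[j] < nums[i]: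
--                 inc[i] = max(inc[i], inc[j] + 1)
--     dec = [1] * n                        # longest strictly decreasing subsequence starting at i
--     for i in range(n - 1, -1, -1):
--         for j in range(i + 1, n):
--             if nums[j] < nums[i]:
--                 dec[i] = max(dec[i], dec[j] + 1)
--     best = 1                             # combine per peak
--     for i in range(n):
--         if inc[i] > 1 and dec[i] > 1:
--             best = max(best, inc[i] + dec[i] - 1)
--     return n - best
-- ===== Notes on version B (the rewrite author's own statement) =====
-- stated objective: alternative
-- what changed: A tracks mountains with a chained forward DP (dp2 extends either a rising run or an earlier mountain); B instead computes the classic two symmetric LIS arrays - longest increase ending at i (forward pass) and longest decrease starting at i (backward pass) - and combines them per peak as inc[i]+dec[i]-1.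
import Mathlib
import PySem

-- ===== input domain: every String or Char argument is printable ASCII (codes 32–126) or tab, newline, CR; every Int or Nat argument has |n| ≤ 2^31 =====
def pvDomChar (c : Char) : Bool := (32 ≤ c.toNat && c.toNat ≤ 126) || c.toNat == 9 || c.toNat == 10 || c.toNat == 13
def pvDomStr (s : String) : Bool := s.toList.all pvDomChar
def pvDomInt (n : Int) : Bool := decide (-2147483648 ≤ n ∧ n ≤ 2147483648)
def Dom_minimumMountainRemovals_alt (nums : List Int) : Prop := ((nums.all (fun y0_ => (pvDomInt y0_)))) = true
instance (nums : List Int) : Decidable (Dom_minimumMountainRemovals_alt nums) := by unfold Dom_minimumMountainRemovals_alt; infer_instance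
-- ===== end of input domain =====

-- B replaces A's chained forward "mountain-suffix" DP (dp2) by the classic two symmetric
-- LIS passes (longest increase ending at i, longest decrease starting at i) combined per
-- peak as inc[i]+dec[i]-1; same O(n^2) cost, different algorithm (objective: alternative).

-- ===== PORT A =====
def minimumMountainRemovals_alt (nums : List Int) : Int :=
  let n : Int := (nums.length : Int)
  let st :=
    (PySem.List.pyRange 1 n 1).foldl (fun (st : List Int × List Int) i =>
      (PySem.List.pyRange 0 i 1).foldl (fun (st : List Int × List Int) j =>
        let dp1 :=
          if PySem.List.pyGetD nums j 0 < PySem.List.pyGetD nums i 0 then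
            PySem.List.pySetD st.1 i (max (PySem.List.pyGetD st.1 i 0) (1 + PySem.List.pyGetD st.1 j 0))
          else st.1
        let dp2 :=
          if PySem.List.pyGetD nums j 0 > PySem.List.pyGetD nums i 0 then
            let dp2' :=
              if PySem.List.pyGetD dp1 j 0 > 1 then
                PySem.List.pySetD st.2 i (max (PySem.List.pyGetD st.2 i 0) (1 + PySem.List.pyGetD dp1 j 0))
              else st.2
            if PySem.List.pyGetD dp2' j 0 > 1 then
              PySem.List.pySetD dp2' i (max (PySem.List.pyGetD dp2' i 0) (1 + PySem.List.pyGetD dp2' j 0))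
            else dp2'
          else st.2
        (dp1, dp2)) st)
      (List.replicate nums.length (1 : Int), List.replicate nums.length (1 : Int))
  n - (PySem.List.max? st.2 (fun x => x)).getD 0

-- ===== PORT B =====
def minimumMountainRemovals_alt_alt (nums : List Int) : Int :=
  let n : Int := (nums.length : Int)
  let inc :=
    (PySem.List.pyRange 0 n 1).foldl (fun (inc : List Int) i =>
      (PySem.List.pyRange 0 i 1).foldl (fun (inc : List Int) j =>
        if PySem.List.pyGetD nums j 0 < PySem.List.pyGetD nums i 0 then
          PySem.List.pySetD inc i (max (PySem.List.pyGetD inc i 0) (PySem.List.pyGetD inc j 0 + 1))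
        else inc) inc)
      (List.replicate nums.length (1 : Int))
  let dec :=
    (PySem.List.pyRange (n - 1) (-1) (-1)).foldl (fun (dec : List Int) i =>
      (PySem.List.pyRange (i + 1) n 1).foldl (fun (dec : List Int) j =>
        if PySem.List.pyGetD nums j 0 < PySem.List.pyGetD nums i 0 then
          PySem.List.pySetD dec i (max (PySem.List.pyGetD dec i 0) (PySem.List.pyGetD dec j 0 + 1))
        else dec) dec)
      (List.replicate nums.length (1 : Int))
  let best :=
    (PySem.List.pyRange 0 n 1).foldl (fun (best : Int) i =>
      if PySem.List.pyGetD inc i 0 > 1 ∧ PySem.List.pyGetD dec i 0 > 1 then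
        max best (PySem.List.pyGetD inc i 0 + PySem.List.pyGetD dec i 0 - 1)
      else best) 1
  n - best

-- ===== PRECONDITION & SPEC =====
-- Pre_ excludes only the empty list, on which A's max(dp2) raises ValueError.
def Pre_minimumMountainRemovals_alt (nums : List Int) : Prop := nums ≠ []
instance (nums : List Int) : Decidable (Pre_minimumMountainRemovals_alt nums) := by
  unfold Pre_minimumMountainRemovals_alt; infer_instance
def pvWitness_minimumMountainRemovals_alt : List Int := [1, 3, 1]

def Spec_minimumMountainRemovals_alt (nums : List Int) (out : Int) : Prop := out = minimumMountainRemovals_alt_alt nums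
instance (nums : List Int) (out : Int) : Decidable (Spec_minimumMountainRemovals_alt nums out) := by unfold Spec_minimumMountainRemovals_alt; infer_instance

-- ===== CLAIM (what is proved, stated in full; the proofs are below) =====
def Claim_equal_minimumMountainRemovals_alt : Prop := ∀ (nums : List Int), Dom_minimumMountainRemovals_alt nums → Pre_minimumMountainRemovals_alt nums → Spec_minimumMountainRemovals_alt nums (minimumMountainRemovals_alt nums)

-- ===== LEMMAS AND PROOFS =====

-- generic facts about the running-max-with-test loop shape
theorem iteMax_le {α : Type} (c : α → Prop) [DecidablePred c] (f : α → Int) :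
    ∀ (l : List α) (init : Int),
      init ≤ l.foldl (fun b x => if c x then max b (f x) else b) init := by
  intro l
  induction l with
  | nil => intro init; simp
  | cons a t ih =>
    intro init
    simp only [List.foldl_cons]
    refine le_trans ?_ (ih _)
    split <;> simp

theorem iteMax_mem_le {α : Type} (c : α → Prop) [DecidablePred c] (f : α → Int)
    {l : List α} {x : α} (hx : x ∈ l) (hc : c x) (init : Int) :
    f x ≤ l.foldl (fun b x => if c x then max b (f x) else b) init := by
  induction l generalizing init with
  | nil => cases hx
  | cons a t ih =>
    simp only [List.foldl_cons]
    rcases List.mem_cons.mp hx with h | h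
    · subst h
      refine le_trans ?_ (iteMax_le c f t _)
      simp [hc]
    · exact ih h _

theorem iteMax_cases {α : Type} (c : α → Prop) [DecidablePred c] (f : α → Int) :
    ∀ (l : List α) (init : Int),
      l.foldl (fun b x => if c x then max b (f x) else b) init = init ∨
        ∃ x ∈ l, c x ∧ l.foldl (fun b x => if c x then max b (f x) else b) init = f x := by
  intro l
  induction l with
  | nil => intro init; left; rfl
  | cons a t ih =>
    intro init
    simp only [List.foldl_cons]
    rcases ih (if c a then max init (f a) else init) with h | ⟨x, hx, hcx, h⟩
    · by_cases hca : c a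
      · rw [h, if_pos hca]
        rcases max_choice init (f a) with h' | h'
        · left; exact h'
        · right; exact ⟨a, List.mem_cons_self, hca, h'⟩
      · left; rw [h, if_neg hca]
    · right; exact ⟨x, List.mem_cons_of_mem _ hx, hcx, h⟩

-- generic facts about the two-stage running-max loop shape (A's dp2 inner loop)
theorem ite2_le {α : Type} (c1 c2 : α → Prop) [DecidablePred c1] [DecidablePred c2]
    (f1 f2 : α → Int) :
    ∀ (l : List α) (init : Int),
      init ≤ l.foldl (fun b x =>
        if c2 x then max (if c1 x then max b (f1 x) else b) (f2 x)
        else (if c1 x then max b (f1 x) else b)) init := by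
  intro l
  induction l with
  | nil => intro init; simp
  | cons a t ih =>
    intro init
    simp only [List.foldl_cons]
    refine le_trans ?_ (ih _)
    split <;> split <;> simp

theorem ite2_mem_le1 {α : Type} (c1 c2 : α → Prop) [DecidablePred c1] [DecidablePred c2]
    (f1 f2 : α → Int) {l : List α} {x : α} (hx : x ∈ l) (hc : c1 x) (init : Int) :
    f1 x ≤ l.foldl (fun b x =>
        if c2 x then max (if c1 x then max b (f1 x) else b) (f2 x)
        else (if c1 x then max b (f1 x) else b)) init := by
  induction l generalizing init with
  | nil => cases hx
  | cons a t ih =>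
    simp only [List.foldl_cons]
    rcases List.mem_cons.mp hx with h | h
    · subst h
      refine le_trans ?_ (ite2_le c1 c2 f1 f2 t _)
      by_cases h2 : c2 x <;> simp [hc, h2]
    · exact ih h _

theorem ite2_mem_le2 {α : Type} (c1 c2 : α → Prop) [DecidablePred c1] [DecidablePred c2]
    (f1 f2 : α → Int) {l : List α} {x : α} (hx : x ∈ l) (hc : c2 x) (init : Int) :
    f2 x ≤ l.foldl (fun b x =>
        if c2 x then max (if c1 x then max b (f1 x) else b) (f2 x)
        else (if c1 x then max b (f1 x) else b)) init := by
  induction l generalizing init with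
  | nil => cases hx
  | cons a t ih =>
    simp only [List.foldl_cons]
    rcases List.mem_cons.mp hx with h | h
    · subst h
      refine le_trans ?_ (ite2_le c1 c2 f1 f2 t _)
      simp [hc]
    · exact ih h _

theorem ite2_cases {α : Type} (c1 c2 : α → Prop) [DecidablePred c1] [DecidablePred c2]
    (f1 f2 : α → Int) :
    ∀ (l : List α) (init : Int),
      (l.foldl (fun b x =>
        if c2 x then max (if c1 x then max b (f1 x) else b) (f2 x)
        else (if c1 x then max b (f1 x) else b)) init = init) ∨
      ∃ x ∈ l, (c1 x ∧ l.foldl (fun b x =>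
        if c2 x then max (if c1 x then max b (f1 x) else b) (f2 x)
        else (if c1 x then max b (f1 x) else b)) init = f1 x) ∨
        (c2 x ∧ l.foldl (fun b x =>
        if c2 x then max (if c1 x then max b (f1 x) else b) (f2 x)
        else (if c1 x then max b (f1 x) else b)) init = f2 x) := by
  intro l
  induction l with
  | nil => intro init; left; rfl
  | cons a t ih =>
    intro init
    simp only [List.foldl_cons]
    rcases ih _ with h | ⟨x, hx, h⟩
    · -- the fold of the tail returned its initial value: analyse the first step
      rw [h]
      by_cases h1 : c1 a <;> by_cases h2 : c2 a
      · rw [if_pos h2, if_pos h1]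
        rcases max_choice (max init (f1 a)) (f2 a) with h' | h'
        · rcases max_choice init (f1 a) with h'' | h'' 
          · left; rw [h', h'']
          · right; exact ⟨a, List.mem_cons_self, Or.inl ⟨h1, by rw [h', h'']⟩⟩
        · right; exact ⟨a, List.mem_cons_self, Or.inr ⟨h2, h'⟩⟩
      · rw [if_neg h2, if_pos h1]
        rcases max_choice init (f1 a) with h' | h'
        · left; exact h'
        · right; exact ⟨a, List.mem_cons_self, Or.inl ⟨h1, h'⟩⟩
      · rw [if_pos h2, if_neg h1]
        rcases max_choice init (f2 a) with h' | h'
        · left; exact h'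
        · right; exact ⟨a, List.mem_cons_self, Or.inr ⟨h2, h'⟩⟩
      · left; rw [if_neg h2, if_neg h1]
    · right; exact ⟨x, List.mem_cons_of_mem _ hx, h⟩

-- the per-index value functions the two programs compute
def incF (nums : List Int) (i : Nat) : Int :=
  (List.range i).attach.foldl
    (fun b j => if nums.getD j.1 0 < nums.getD i 0 then max b (1 + incF nums j.1) else b) 1
termination_by i
decreasing_by exact List.mem_range.mp j.2

def dp2F (nums : List Int) (i : Nat) : Int :=
  (List.range i).attach.foldl
    (fun b j =>
      if nums.getD j.1 0 > nums.getD i 0 ∧ dp2F nums j.1 > 1 then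
        max (if nums.getD j.1 0 > nums.getD i 0 ∧ incF nums j.1 > 1 then
               max b (1 + incF nums j.1) else b) (1 + dp2F nums j.1)
      else (if nums.getD j.1 0 > nums.getD i 0 ∧ incF nums j.1 > 1 then
               max b (1 + incF nums j.1) else b)) 1
termination_by i
decreasing_by all_goals exact List.mem_range.mp j.2

def decF (nums : List Int) (i : Nat) : Int :=
  (List.range (nums.length - (i + 1))).attach.foldl
    (fun b t =>
      if nums.getD (i + 1 + t.1) 0 < nums.getD i 0 then
        max b (decF nums (i + 1 + t.1) + 1) else b) 1
termination_by nums.length - i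
decreasing_by have := List.mem_range.mp t.2; omega

theorem incF_eq (nums : List Int) (i : Nat) :
    incF nums i = (List.range i).foldl
      (fun b j => if nums.getD j 0 < nums.getD i 0 then max b (1 + incF nums j) else b) 1 := by
  conv_lhs => unfold incF
  exact List.foldl_attach (l := List.range i) (b := 1)
    (f := fun b j => if nums.getD j 0 < nums.getD i 0 then max b (1 + incF nums j) else b)

theorem dp2F_eq (nums : List Int) (i : Nat) :
    dp2F nums i = (List.range i).foldl
      (fun b j =>
        if nums.getD j 0 > nums.getD i 0 ∧ dp2F nums j > 1 then
          max (if nums.getD j 0 > nums.getD i 0 ∧ incF nums j > 1 then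
                 max b (1 + incF nums j) else b) (1 + dp2F nums j)
        else (if nums.getD j 0 > nums.getD i 0 ∧ incF nums j > 1 then
                 max b (1 + incF nums j) else b)) 1 := by
  conv_lhs => unfold dp2F
  exact List.foldl_attach (l := List.range i) (b := 1)
    (f := fun b j =>
      if nums.getD j 0 > nums.getD i 0 ∧ dp2F nums j > 1 then
        max (if nums.getD j 0 > nums.getD i 0 ∧ incF nums j > 1 then
               max b (1 + incF nums j) else b) (1 + dp2F nums j)
      else (if nums.getD j 0 > nums.getD i 0 ∧ incF nums j > 1 then
               max b (1 + incF nums j) else b))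

theorem decF_eq (nums : List Int) (i : Nat) :
    decF nums i = (List.range (nums.length - (i + 1))).foldl
      (fun b t =>
        if nums.getD (i + 1 + t) 0 < nums.getD i 0 then
          max b (decF nums (i + 1 + t) + 1) else b) 1 := by
  conv_lhs => unfold decF
  exact List.foldl_attach (l := List.range (nums.length - (i + 1))) (b := 1)
    (f := fun b t =>
      if nums.getD (i + 1 + t) 0 < nums.getD i 0 then
        max b (decF nums (i + 1 + t) + 1) else b)

theorem dp2F_ge_one (nums : List Int) (i : Nat) : 1 ≤ dp2F nums i := by
  rw [dp2F_eq]; exact ite2_le _ _ _ _ _ _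

theorem decF_ge_one (nums : List Int) (i : Nat) : 1 ≤ decF nums i := by
  rw [decF_eq]; exact iteMax_le _ _ _ _

theorem dp2F_lb1 (nums : List Int) {j i : Nat} (hj : j < i)
    (h : nums.getD j 0 > nums.getD i 0) (h1 : incF nums j > 1) :
    1 + incF nums j ≤ dp2F nums i := by
  rw [dp2F_eq nums i]
  exact ite2_mem_le1 (fun j => nums.getD j 0 > nums.getD i 0 ∧ incF nums j > 1)
    (fun j => nums.getD j 0 > nums.getD i 0 ∧ dp2F nums j > 1)
    (fun j => 1 + incF nums j) (fun j => 1 + dp2F nums j)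
    (List.mem_range.mpr hj) ⟨h, h1⟩ 1

theorem dp2F_lb2 (nums : List Int) {j i : Nat} (hj : j < i)
    (h : nums.getD j 0 > nums.getD i 0) (h1 : dp2F nums j > 1) :
    1 + dp2F nums j ≤ dp2F nums i := by
  rw [dp2F_eq nums i]
  exact ite2_mem_le2 (fun j => nums.getD j 0 > nums.getD i 0 ∧ incF nums j > 1)
    (fun j => nums.getD j 0 > nums.getD i 0 ∧ dp2F nums j > 1)
    (fun j => 1 + incF nums j) (fun j => 1 + dp2F nums j)
    (List.mem_range.mpr hj) ⟨h, h1⟩ 1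

theorem dp2F_cases (nums : List Int) (i : Nat) :
    dp2F nums i = 1 ∨ ∃ j, j < i ∧ nums.getD j 0 > nums.getD i 0 ∧
      ((incF nums j > 1 ∧ dp2F nums i = 1 + incF nums j) ∨
       (dp2F nums j > 1 ∧ dp2F nums i = 1 + dp2F nums j)) := by
  rw [dp2F_eq]
  rcases ite2_cases (fun j => nums.getD j 0 > nums.getD i 0 ∧ incF nums j > 1)
      (fun j => nums.getD j 0 > nums.getD i 0 ∧ dp2F nums j > 1)
      (fun j => 1 + incF nums j) (fun j => 1 + dp2F nums j)
      (List.range i) 1 with h | ⟨j, hj, h⟩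
  · left; exact h
  · right
    rcases h with ⟨⟨hg, h1⟩, h⟩ | ⟨⟨hg, h1⟩, h⟩
    · exact ⟨j, List.mem_range.mp hj, hg, Or.inl ⟨h1, h⟩⟩
    · exact ⟨j, List.mem_range.mp hj, hg, Or.inr ⟨h1, h⟩⟩

theorem decF_lb (nums : List Int) {i j : Nat} (hij : i < j) (hj : j < nums.length)
    (h : nums.getD j 0 < nums.getD i 0) : decF nums j + 1 ≤ decF nums i := by
  rw [decF_eq nums i]
  have ht : j - (i + 1) ∈ List.range (nums.length - (i + 1)) := by
    rw [List.mem_range]; omega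
  have hji : i + 1 + (j - (i + 1)) = j := by omega
  have hc : nums.getD (i + 1 + (j - (i + 1))) 0 < nums.getD i 0 := by rw [hji]; exact h
  have := iteMax_mem_le (fun t => nums.getD (i + 1 + t) 0 < nums.getD i 0)
      (fun t => decF nums (i + 1 + t) + 1) ht hc 1
  rw [hji] at this
  exact this

theorem decF_cases (nums : List Int) (i : Nat) :
    decF nums i = 1 ∨ ∃ j, i < j ∧ j < nums.length ∧ nums.getD j 0 < nums.getD i 0 ∧
      decF nums i = decF nums j + 1 := by
  rw [decF_eq]
  rcases iteMax_cases (fun t => nums.getD (i + 1 + t) 0 < nums.getD i 0)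
      (fun t => decF nums (i + 1 + t) + 1) (List.range (nums.length - (i + 1))) 1 with
    h | ⟨t, ht, hc, h⟩
  · left; exact h
  · right
    have ht' := List.mem_range.mp ht
    exact ⟨i + 1 + t, by omega, by omega, hc, h⟩

-- ===== the combinatorial heart: max over dp2F = max over per-peak combination =====

-- upper bound: every mountain ending at i is dominated by some peak combination
theorem dp2F_peak_bound (nums : List Int) :
    ∀ i, i < nums.length → 1 < dp2F nums i →
      ∃ p, p < i ∧ nums.getD p 0 > nums.getD i 0 ∧ 1 < incF nums p ∧
        dp2F nums i + decF nums i ≤ incF nums p + decF nums p := by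
  intro i
  induction i using Nat.strong_induction_on with
  | _ i ih =>
    intro hi h2
    rcases dp2F_cases nums i with h | ⟨j, hj, hg, hcase⟩
    · omega
    · have hdec : decF nums i + 1 ≤ decF nums j := decF_lb nums hj hi hg
      rcases hcase with ⟨h1, heq⟩ | ⟨h1, heq⟩
      · exact ⟨j, hj, hg, h1, by omega⟩
      · rcases ih j hj (by omega) h1 with ⟨p, hp, hpg, hpi, hple⟩
        exact ⟨p, by omega, lt_trans hg hpg, hpi, by omega⟩

-- lower bound: walking down the descent that realises decF pumps dp2F up
theorem dp2F_pump (nums : List Int) :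
    ∀ d j, j < nums.length → nums.length - j ≤ d → ∀ b : Int, 2 ≤ b → b ≤ dp2F nums j →
      ∃ i, i < nums.length ∧ b + decF nums j - 1 ≤ dp2F nums i := by
  intro d
  induction d with
  | zero => intro j hj hd; omega
  | succ d ih =>
    intro j hj hd b hb hbd
    rcases decF_cases nums j with h | ⟨k, hjk, hk, hkg, heq⟩
    · exact ⟨j, hj, by omega⟩
    · have hpump : 1 + dp2F nums j ≤ dp2F nums k := dp2F_lb2 nums hjk hkg (by omega)
      rcases ih k hk (by omega) (b + 1) (by omega) (by omega) with ⟨i, hi, hle⟩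
      exact ⟨i, hi, by omega⟩

theorem peak_realised (nums : List Int) {p : Nat} (_hp : p < nums.length)
    (h1 : 1 < incF nums p) (h2 : 1 < decF nums p) :
    ∃ i, i < nums.length ∧ incF nums p + decF nums p - 1 ≤ dp2F nums i := by
  rcases decF_cases nums p with h | ⟨k, hpk, hk, hkg, heq⟩
  · omega
  · have hbase : 1 + incF nums p ≤ dp2F nums k := dp2F_lb1 nums hpk hkg h1
    rcases dp2F_pump nums nums.length k hk (by omega) (1 + incF nums p) (by omega) hbase
      with ⟨i, hi, hle⟩
    exact ⟨i, hi, by omega⟩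

-- the per-peak combination loop value
def maxCombine (nums : List Int) : Int :=
  (List.range nums.length).foldl
    (fun b i =>
      if incF nums i > 1 ∧ decF nums i > 1 then
        max b (incF nums i + decF nums i - 1)
      else b) 1

theorem max_dp2_eq_maxCombine (nums : List Int) (h : nums ≠ []) :
    (PySem.List.max? ((List.range nums.length).map (dp2F nums)) (fun x => x)).getD 0 =
      maxCombine nums := by
  have hn : 0 < nums.length := List.length_pos_iff.mpr h
  obtain ⟨m, hm⟩ : ∃ m, PySem.List.max? ((List.range nums.length).map (dp2F nums))
      (fun x => x) = some m := by
    rcases Option.eq_none_or_eq_some (PySem.List.max?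
        ((List.range nums.length).map (dp2F nums)) (fun x => x)) with h' | h'
    · exfalso
      have := (PySem.List.max?_eq_none_iff _ _).mp h'
      have hlen : (List.range nums.length).length = 0 := by
        rw [← List.length_map (f := dp2F nums), this]; rfl
      rw [List.length_range] at hlen; omega
    · exact h'
  rw [hm, Option.getD_some]
  have hmem := PySem.List.max?_mem hm
  obtain ⟨i0, hi0, hi0m⟩ : ∃ i0, i0 < nums.length ∧ dp2F nums i0 = m := by
    rcases List.mem_map.mp hmem with ⟨i0, hi0, hval⟩
    exact ⟨i0, List.mem_range.mp hi0, hval⟩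
  have hmax := PySem.List.max?_isMax hm
  have hub : ∀ i, i < nums.length → dp2F nums i ≤ m := by
    intro i hi
    exact hmax _ (List.mem_map.mpr ⟨i, List.mem_range.mpr hi, rfl⟩)
  apply le_antisymm
  · -- m ≤ maxCombine
    by_cases h2 : 1 < dp2F nums i0
    · rcases dp2F_peak_bound nums i0 hi0 h2 with ⟨p, hp, hpg, hpi, hple⟩
      have hdecp : decF nums i0 + 1 ≤ decF nums p := decF_lb nums hp hi0 hpg
      have hdeci0 : 1 ≤ decF nums i0 := decF_ge_one nums i0
      have hcomb : incF nums p + decF nums p - 1 ≤ maxCombine nums := by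
        unfold maxCombine
        exact iteMax_mem_le (fun i => incF nums i > 1 ∧ decF nums i > 1)
          (fun i => incF nums i + decF nums i - 1)
          (List.mem_range.mpr (by omega)) ⟨hpi, by omega⟩ 1
      omega
    · have : maxCombine nums ≥ 1 := by unfold maxCombine; exact iteMax_le _ _ _ _
      omega
  · -- maxCombine ≤ m
    unfold maxCombine
    rcases iteMax_cases (fun i => incF nums i > 1 ∧ decF nums i > 1)
        (fun i => incF nums i + decF nums i - 1) (List.range nums.length) 1 with
      h' | ⟨p, hp, ⟨hp1, hp2⟩, h'⟩
    · rw [h', ← hi0m]; have := dp2F_ge_one nums i0; omega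
    · rw [h']
      rcases peak_realised nums (List.mem_range.mp hp) hp1 hp2 with ⟨i, hi, hle⟩
      have := hub i hi
      omega

-- ===== bridging the imperative ports to the per-index functions =====

-- array prefixes of final values (forward passes)
def finArr (n : Nat) (F : Nat → Int) (k : Nat) : List Int :=
  (List.range n).map (fun t => if t < k then F t else 1)

-- array suffixes of final values (backward pass)
def backArr (n : Nat) (F : Nat → Int) (k : Nat) : List Int :=
  (List.range n).map (fun t => if n - k ≤ t then F t else 1)

theorem finArr_length (n : Nat) (F : Nat → Int) (k : Nat) : (finArr n F k).length = n := by
  simp [finArr]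

theorem backArr_length (n : Nat) (F : Nat → Int) (k : Nat) : (backArr n F k).length = n := by
  simp [backArr]

theorem finArr_getD (n : Nat) (F : Nat → Int) (k t : Nat) (ht : t < n) :
    (finArr n F k).getD t 0 = if t < k then F t else 1 := by
  unfold finArr
  exact PySem.List.getD_map_range _ _ _ _ ht

theorem backArr_getD (n : Nat) (F : Nat → Int) (k t : Nat) (ht : t < n) :
    (backArr n F k).getD t 0 = if n - k ≤ t then F t else 1 := by
  unfold backArr
  exact PySem.List.getD_map_range _ _ _ _ ht

theorem finArr_zero (n : Nat) (F : Nat → Int) :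
    finArr n F 0 = List.replicate n 1 := by
  unfold finArr
  rw [List.eq_replicate_iff]
  constructor
  · simp
  · intro b hb
    rcases List.mem_map.mp hb with ⟨t, _, hval⟩
    simpa using hval.symm

theorem backArr_zero (n : Nat) (F : Nat → Int) :
    backArr n F 0 = List.replicate n 1 := by
  unfold backArr
  rw [List.eq_replicate_iff]
  constructor
  · simp
  · intro b hb
    rcases List.mem_map.mp hb with ⟨t, ht, hval⟩
    have := List.mem_range.mp ht
    rw [if_neg (by omega)] at hval
    exact hval.symm

theorem finArr_one (n : Nat) (F : Nat → Int) (hF : F 0 = 1) :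
    finArr n F 1 = List.replicate n 1 := by
  unfold finArr
  rw [List.eq_replicate_iff]
  constructor
  · simp
  · intro b hb
    rcases List.mem_map.mp hb with ⟨t, _, hval⟩
    rcases Nat.eq_zero_or_pos t with h | h
    · subst h; simp [hF] at hval; omega
    · rw [if_neg (by omega)] at hval; exact hval.symm

theorem finArr_getElem {n : Nat} (F : Nat → Int) {k t : Nat}
    (h : t < (finArr n F k).length) : (finArr n F k)[t] = if t < k then F t else 1 := by
  simp [finArr]

theorem backArr_getElem {n : Nat} (F : Nat → Int) {k t : Nat}
    (h : t < (backArr n F k).length) : (backArr n F k)[t] = if n - k ≤ t then F t else 1 := by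
  simp [backArr]

theorem finArr_set_one (n : Nat) (F : Nat → Int) (k : Nat) :
    (finArr n F k).set k 1 = finArr n F k := by
  apply List.ext_getElem
  · simp
  · intro t h1 h2
    by_cases htk : t = k
    · subst htk
      rw [List.getElem_set_self h1, finArr_getElem F h2, if_neg (lt_irrefl t)]
    · rw [List.getElem_set_ne (by omega) h1]

theorem finArr_set_self (n : Nat) (F : Nat → Int) {k : Nat} (hk : k < n) :
    (finArr n F k).set k (F k) = finArr n F (k + 1) := by
  apply List.ext_getElem
  · simp [finArr]
  · intro t h1 h2
    rw [finArr_getElem F h2]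
    by_cases htk : t = k
    · subst htk
      rw [List.getElem_set_self h1, if_pos (by omega)]
    · rw [List.getElem_set_ne (by omega) h1, finArr_getElem F (by simp [finArr]; simpa [finArr] using h2)]
      by_cases h : t < k
      · rw [if_pos h, if_pos (by omega)]
      · rw [if_neg h, if_neg (by omega)]

theorem backArr_set_one (n : Nat) (F : Nat → Int) {k : Nat} (hk : k < n) :
    (backArr n F k).set (n - 1 - k) 1 = backArr n F k := by
  apply List.ext_getElem
  · simp
  · intro t h1 h2
    by_cases htk : t = n - 1 - k
    · subst htk
      rw [List.getElem_set_self h1, backArr_getElem F h2, if_neg (by omega)]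
    · rw [List.getElem_set_ne (by omega) h1]

theorem backArr_set_self (n : Nat) (F : Nat → Int) {k : Nat} (hk : k < n) :
    (backArr n F k).set (n - 1 - k) (F (n - 1 - k)) = backArr n F (k + 1) := by
  apply List.ext_getElem
  · simp [backArr]
  · intro t h1 h2
    rw [backArr_getElem F h2]
    by_cases htk : t = n - 1 - k
    · subst htk
      rw [List.getElem_set_self h1, if_pos (by omega)]
    · rw [List.getElem_set_ne (by omega) h1, backArr_getElem F (by simp [backArr]; simpa [backArr] using h2)]
      have ht : t < n := by simpa [backArr] using h2
      by_cases h : n - k ≤ t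
      · rw [if_pos h, if_pos (by omega)]
      · rw [if_neg h, if_neg (by omega)]

theorem finArr_full (n : Nat) (F : Nat → Int) :
    finArr n F n = (List.range n).map F := by
  unfold finArr
  apply List.map_congr_left
  intro t ht
  rw [if_pos (List.mem_range.mp ht)]

-- Nat-level loop bodies
def step1 (nums : List Int) (i : Nat) (dp1 : List Int) (j : Nat) : List Int :=
  if nums.getD j 0 < nums.getD i 0 then
    dp1.set i (max (dp1.getD i 0) (1 + dp1.getD j 0))
  else dp1

def stepA (nums : List Int) (i : Nat) (st : List Int × List Int) (j : Nat) :
    List Int × List Int :=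
  let dp1 := step1 nums i st.1 j
  let dp2 :=
    if nums.getD j 0 > nums.getD i 0 then
      let d := if dp1.getD j 0 > 1 then
          st.2.set i (max (st.2.getD i 0) (1 + dp1.getD j 0)) else st.2
      if d.getD j 0 > 1 then
        d.set i (max (d.getD i 0) (1 + d.getD j 0)) else d
    else st.2
  (dp1, dp2)

def stepD (nums : List Int) (i : Nat) (dec : List Int) (j : Nat) : List Int :=
  if nums.getD j 0 < nums.getD i 0 then
    dec.set i (max (dec.getD i 0) (dec.getD j 0 + 1))
  else dec

def incPart (nums : List Int) (i m : Nat) : Int :=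
  (List.range m).foldl
    (fun b j => if nums.getD j 0 < nums.getD i 0 then max b (1 + incF nums j) else b) 1

def dp2Part (nums : List Int) (i m : Nat) : Int :=
  (List.range m).foldl
    (fun b j =>
      if nums.getD j 0 > nums.getD i 0 ∧ dp2F nums j > 1 then
        max (if nums.getD j 0 > nums.getD i 0 ∧ incF nums j > 1 then
               max b (1 + incF nums j) else b) (1 + dp2F nums j)
      else (if nums.getD j 0 > nums.getD i 0 ∧ incF nums j > 1 then
               max b (1 + incF nums j) else b)) 1

theorem incPart_self (nums : List Int) (i : Nat) : incPart nums i i = incF nums i := by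
  rw [incF_eq]; rfl

theorem dp2Part_self (nums : List Int) (i : Nat) : dp2Part nums i i = dp2F nums i := by
  rw [dp2F_eq]; rfl


theorem getD_set_self' (l : List Int) {i : Nat} (h : i < l.length) (v : Int) :
    (l.set i v).getD i 0 = v := by
  rw [List.getD_eq_getElem?_getD, List.getElem?_set_self h]; rfl

theorem getD_set_ne' (l : List Int) {i j : Nat} (h : i ≠ j) (v : Int) :
    (l.set i v).getD j 0 = l.getD j 0 := by
  rw [List.getD_eq_getElem?_getD, List.getElem?_set_ne h, ← List.getD_eq_getElem?_getD]

theorem incF_zero (nums : List Int) : incF nums 0 = 1 := by rw [incF_eq]; rfl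

theorem dp2F_zero (nums : List Int) : dp2F nums 0 = 1 := by rw [dp2F_eq]; rfl

theorem incPart_succ (nums : List Int) (i m : Nat) :
    incPart nums i (m + 1) =
      if nums.getD m 0 < nums.getD i 0 then max (incPart nums i m) (1 + incF nums m)
      else incPart nums i m := by
  unfold incPart
  rw [List.range_succ, List.foldl_append, List.foldl_cons, List.foldl_nil]

theorem dp2Part_succ (nums : List Int) (i m : Nat) :
    dp2Part nums i (m + 1) =
      if nums.getD m 0 > nums.getD i 0 ∧ dp2F nums m > 1 then
        max (if nums.getD m 0 > nums.getD i 0 ∧ incF nums m > 1 then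
               max (dp2Part nums i m) (1 + incF nums m) else dp2Part nums i m)
          (1 + dp2F nums m)
      else (if nums.getD m 0 > nums.getD i 0 ∧ incF nums m > 1 then
               max (dp2Part nums i m) (1 + incF nums m) else dp2Part nums i m) := by
  unfold dp2Part
  rw [List.range_succ, List.foldl_append, List.foldl_cons, List.foldl_nil]


-- inner-loop invariant of port A at outer index i
theorem innerA (nums : List Int) {i : Nat} (hi : i < nums.length) :
    ∀ m, m ≤ i →
      (List.range m).foldl (stepA nums i)
          (finArr nums.length (incF nums) i, finArr nums.length (dp2F nums) i) =
        ((finArr nums.length (incF nums) i).set i (incPart nums i m),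
         (finArr nums.length (dp2F nums) i).set i (dp2Part nums i m)) := by
  intro m
  induction m with
  | zero =>
    intro _
    simp only [List.range_zero, List.foldl_nil]
    rw [show incPart nums i 0 = 1 from rfl, show dp2Part nums i 0 = 1 from rfl,
        finArr_set_one, finArr_set_one]
  | succ m ih =>
    intro hm
    have hmi : m < i := by omega
    rw [List.range_succ, List.foldl_append, ih (by omega), List.foldl_cons, List.foldl_nil]
    have hXi : ∀ v : Int, (((finArr nums.length (incF nums) i).set i v).getD i 0) = v :=
      fun v => getD_set_self' _ (by rw [finArr_length]; exact hi) v
    have hXm : ∀ v : Int, (((finArr nums.length (incF nums) i).set i v).getD m 0) = incF nums m := by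
      intro v
      rw [getD_set_ne' _ (by omega), finArr_getD _ _ _ _ (by omega), if_pos hmi]
    have hYi : ∀ v : Int, (((finArr nums.length (dp2F nums) i).set i v).getD i 0) = v :=
      fun v => getD_set_self' _ (by rw [finArr_length]; exact hi) v
    have hYm : ∀ v : Int, (((finArr nums.length (dp2F nums) i).set i v).getD m 0) = dp2F nums m := by
      intro v
      rw [getD_set_ne' _ (by omega), finArr_getD _ _ _ _ (by omega), if_pos hmi]
    simp only [List.getD_eq_getElem?_getD] at hXi hXm hYi hYm
    rw [incPart_succ, dp2Part_succ]
    unfold stepA step1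
    by_cases h1 : nums[m]?.getD 0 < nums[i]?.getD 0 <;>
      by_cases h2 : nums[i]?.getD 0 < nums[m]?.getD 0 <;>
      by_cases hI : (1:Int) < incF nums m <;>
      by_cases hD : (1:Int) < dp2F nums m <;>
        simp [h1, h2, hI, hD, hXi, hXm, hYi, hYm, List.set_set,
          List.getD_eq_getElem?_getD]

-- final state of port A's nested loops
theorem outerA (nums : List Int) :
    ∀ k, k + 1 ≤ nums.length →
      (List.range k).foldl
          (fun st t => (List.range (t + 1)).foldl (stepA nums (t + 1)) st)
          (finArr nums.length (incF nums) 1, finArr nums.length (dp2F nums) 1) =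
        (finArr nums.length (incF nums) (k + 1),
         finArr nums.length (dp2F nums) (k + 1)) := by
  intro k
  induction k with
  | zero => intro _; rw [List.range_zero, List.foldl_nil]
  | succ k ih =>
    intro hk
    rw [List.range_succ, List.foldl_append, ih (by omega), List.foldl_cons, List.foldl_nil]
    rw [innerA nums (show k + 1 < nums.length by omega) (k + 1) le_rfl, incPart_self,
        dp2Part_self, finArr_set_self _ _ (by omega), finArr_set_self _ _ (by omega)]

-- inner-loop invariant of port B's inc pass
theorem innerB (nums : List Int) {i : Nat} (hi : i < nums.length) :
    ∀ m, m ≤ i →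
      (List.range m).foldl (step1 nums i) (finArr nums.length (incF nums) i) =
        (finArr nums.length (incF nums) i).set i (incPart nums i m) := by
  intro m
  induction m with
  | zero =>
    intro _
    simp only [List.range_zero, List.foldl_nil]
    rw [show incPart nums i 0 = 1 from rfl, finArr_set_one]
  | succ m ih =>
    intro hm
    have hmi : m < i := by omega
    rw [List.range_succ, List.foldl_append, ih (by omega), List.foldl_cons, List.foldl_nil]
    unfold step1
    rw [getD_set_self' _ (by rw [finArr_length]; exact hi),
        getD_set_ne' _ (by omega), finArr_getD _ _ _ _ (by omega), if_pos hmi]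
    rw [incPart_succ]
    by_cases hc : nums.getD m 0 < nums.getD i 0
    · rw [if_pos hc, if_pos hc, List.set_set]
    · rw [if_neg hc, if_neg hc]

theorem outerB (nums : List Int) :
    ∀ k, k ≤ nums.length →
      (List.range k).foldl
          (fun inc t => (List.range t).foldl (step1 nums t) inc)
          (List.replicate nums.length (1 : Int)) =
        finArr nums.length (incF nums) k := by
  intro k
  induction k with
  | zero =>
    intro _
    rw [List.range_zero, List.foldl_nil, finArr_zero]
  | succ k ih =>
    intro hk
    rw [List.range_succ, List.foldl_append, ih (by omega), List.foldl_cons, List.foldl_nil]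
    rw [innerB nums (show k < nums.length by omega) k le_rfl, incPart_self,
        finArr_set_self _ _ (by omega)]

def decPart (nums : List Int) (i m : Nat) : Int :=
  (List.range m).foldl
    (fun b t =>
      if nums.getD (i + 1 + t) 0 < nums.getD i 0 then
        max b (decF nums (i + 1 + t) + 1) else b) 1

theorem decPart_self (nums : List Int) (i : Nat) :
    decPart nums i (nums.length - (i + 1)) = decF nums i := by
  rw [decF_eq]; rfl

theorem decPart_succ (nums : List Int) (i m : Nat) :
    decPart nums i (m + 1) =
      if nums.getD (i + 1 + m) 0 < nums.getD i 0 then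
        max (decPart nums i m) (decF nums (i + 1 + m) + 1)
      else decPart nums i m := by
  unfold decPart
  rw [List.range_succ, List.foldl_append, List.foldl_cons, List.foldl_nil]

-- inner-loop invariant of port B's dec pass at index i = n-1-k
theorem innerD (nums : List Int) {k : Nat} (hk : k < nums.length) :
    ∀ m, m ≤ nums.length - (nums.length - 1 - k + 1) →
      (List.range m).foldl
          (fun dec t => stepD nums (nums.length - 1 - k) dec (nums.length - 1 - k + 1 + t))
          (backArr nums.length (decF nums) k) =
        (backArr nums.length (decF nums) k).set (nums.length - 1 - k)
          (decPart nums (nums.length - 1 - k) m) := by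
  intro m
  induction m with
  | zero =>
    intro _
    simp only [List.range_zero, List.foldl_nil]
    rw [show decPart nums (nums.length - 1 - k) 0 = 1 from rfl, backArr_set_one _ _ hk]
  | succ m ih =>
    intro hm
    have hin : nums.length - 1 - k < nums.length := by omega
    have hj : nums.length - 1 - k + 1 + m < nums.length := by omega
    rw [List.range_succ, List.foldl_append, ih (by omega), List.foldl_cons, List.foldl_nil]
    unfold stepD
    rw [getD_set_self' _ (by rw [backArr_length]; exact hin),
        getD_set_ne' _ (by omega), backArr_getD _ _ _ _ hj,
        if_pos (show nums.length - k ≤ nums.length - 1 - k + 1 + m by omega)]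
    rw [decPart_succ]
    by_cases hc : nums.getD (nums.length - 1 - k + 1 + m) 0 < nums.getD (nums.length - 1 - k) 0
    · rw [if_pos hc, if_pos hc, List.set_set]
    · rw [if_neg hc, if_neg hc]

theorem outerD (nums : List Int) :
    ∀ k, k ≤ nums.length →
      (List.range k).foldl
          (fun dec t =>
            (List.range (nums.length - (nums.length - 1 - t + 1))).foldl
              (fun dec u => stepD nums (nums.length - 1 - t) dec (nums.length - 1 - t + 1 + u))
              dec)
          (List.replicate nums.length (1 : Int)) =
        backArr nums.length (decF nums) k := by
  intro k
  induction k with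
  | zero => intro _; rw [List.range_zero, List.foldl_nil, backArr_zero]
  | succ k ih =>
    intro hk
    rw [List.range_succ, List.foldl_append, ih (by omega), List.foldl_cons, List.foldl_nil]
    rw [innerD nums (show k < nums.length by omega) _ le_rfl, decPart_self,
        backArr_set_self _ _ (by omega)]

-- port A computes n - max(map dp2F (range n))
theorem portA_eq (nums : List Int) (h : nums ≠ []) :
    minimumMountainRemovals_alt nums =
      (nums.length : Int) -
        (PySem.List.max? ((List.range nums.length).map (dp2F nums)) (fun x => x)).getD 0 := by
  have hn : 0 < nums.length := List.length_pos_iff.mpr h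
  have hst :
      (PySem.List.pyRange 1 ((nums.length : Int)) 1).foldl
          (fun (st : List Int × List Int) i =>
            (PySem.List.pyRange 0 i 1).foldl (fun (st : List Int × List Int) j =>
              let dp1 :=
                if PySem.List.pyGetD nums j 0 < PySem.List.pyGetD nums i 0 then
                  PySem.List.pySetD st.1 i
                    (max (PySem.List.pyGetD st.1 i 0) (1 + PySem.List.pyGetD st.1 j 0))
                else st.1
              let dp2 :=
                if PySem.List.pyGetD nums j 0 > PySem.List.pyGetD nums i 0 then
                  let dp2' :=
                    if PySem.List.pyGetD dp1 j 0 > 1 then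
                      PySem.List.pySetD st.2 i
                        (max (PySem.List.pyGetD st.2 i 0) (1 + PySem.List.pyGetD dp1 j 0))
                    else st.2
                  if PySem.List.pyGetD dp2' j 0 > 1 then
                    PySem.List.pySetD dp2' i
                      (max (PySem.List.pyGetD dp2' i 0) (1 + PySem.List.pyGetD dp2' j 0))
                  else dp2'
                else st.2
              (dp1, dp2)) st)
          (List.replicate nums.length (1 : Int), List.replicate nums.length (1 : Int)) =
        (finArr nums.length (incF nums) nums.length,
         finArr nums.length (dp2F nums) nums.length) := by
    rw [PySem.List.pyRange_one, List.foldl_map,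
        show ((nums.length : Int) - 1).toNat = nums.length - 1 from by omega,
        show (List.replicate nums.length (1 : Int), List.replicate nums.length (1 : Int)) =
          (finArr nums.length (incF nums) 1, finArr nums.length (dp2F nums) 1) from by
            rw [finArr_one _ _ (incF_zero nums), finArr_one _ _ (dp2F_zero nums)]]
    refine Eq.trans (PySem.List.foldl_congr_mem' _ _
      (fun st t => (List.range (t + 1)).foldl (stepA nums (t + 1)) st) _ ?_) ?_
    · intro k hk st
      rw [show (1 : Int) + (k : Int) = ((k + 1 : Nat) : Int) from by omega,
          PySem.List.pyRange_zero_natCast, List.foldl_map]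
      apply PySem.List.foldl_congr_mem'
      intro j hj st'
      simp only [PySem.List.pyGetD_natCast, PySem.List.pySetD_natCast]
      rfl
    · rw [outerA nums (nums.length - 1) (by omega),
          show nums.length - 1 + 1 = nums.length from by omega]
  simp only [minimumMountainRemovals_alt, hst, finArr_full]

-- port B computes n - maxCombine
theorem portB_eq (nums : List Int) :
    minimumMountainRemovals_alt_alt nums = (nums.length : Int) - maxCombine nums := by
  have hinc :
      (PySem.List.pyRange 0 ((nums.length : Int)) 1).foldl
          (fun (inc : List Int) i =>
            (PySem.List.pyRange 0 i 1).foldl (fun (inc : List Int) j =>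
              if PySem.List.pyGetD nums j 0 < PySem.List.pyGetD nums i 0 then
                PySem.List.pySetD inc i
                  (max (PySem.List.pyGetD inc i 0) (PySem.List.pyGetD inc j 0 + 1))
              else inc) inc)
          (List.replicate nums.length (1 : Int)) =
        finArr nums.length (incF nums) nums.length := by
    rw [PySem.List.pyRange_zero_natCast, List.foldl_map]
    refine Eq.trans (PySem.List.foldl_congr_mem' _ _
      (fun inc t => (List.range t).foldl (step1 nums t) inc) _ ?_)
      (outerB nums nums.length le_rfl)
    intro t ht acc
    rw [PySem.List.pyRange_zero_natCast, List.foldl_map]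
    apply PySem.List.foldl_congr_mem'
    intro j hj acc'
    simp only [PySem.List.pyGetD_natCast, PySem.List.pySetD_natCast]
    unfold step1
    rw [Int.add_comm (acc'.getD j 0) 1]
  have hdec :
      (PySem.List.pyRange ((nums.length : Int) - 1) (-1) (-1)).foldl
          (fun (dec : List Int) i =>
            (PySem.List.pyRange (i + 1) ((nums.length : Int)) 1).foldl
              (fun (dec : List Int) j =>
                if PySem.List.pyGetD nums j 0 < PySem.List.pyGetD nums i 0 then
                  PySem.List.pySetD dec i
                    (max (PySem.List.pyGetD dec i 0) (PySem.List.pyGetD dec j 0 + 1))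
                else dec) dec)
          (List.replicate nums.length (1 : Int)) =
        backArr nums.length (decF nums) nums.length := by
    rw [PySem.List.pyRange_neg_one, List.foldl_map,
        show ((nums.length : Int) - 1 - (-1)).toNat = nums.length from by omega]
    refine Eq.trans (PySem.List.foldl_congr_mem' _ _
      (fun dec t =>
        (List.range (nums.length - (nums.length - 1 - t + 1))).foldl
          (fun dec u => stepD nums (nums.length - 1 - t) dec (nums.length - 1 - t + 1 + u))
          dec) _ ?_)
      (outerD nums nums.length le_rfl)
    intro t ht acc
    have htn := List.mem_range.mp ht
    rw [show (nums.length : Int) - 1 - (t : Int) = ((nums.length - 1 - t : Nat) : Int) from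
          by omega,
        PySem.List.pyRange_one, List.foldl_map,
        show ((nums.length : Int) - (((nums.length - 1 - t : Nat) : Int) + 1)).toNat =
          nums.length - (nums.length - 1 - t + 1) from by omega]
    apply PySem.List.foldl_congr_mem'
    intro u hu acc'
    rw [show ((nums.length - 1 - t : Nat) : Int) + 1 + (u : Int) =
          ((nums.length - 1 - t + 1 + u : Nat) : Int) from by omega]
    simp only [PySem.List.pyGetD_natCast, PySem.List.pySetD_natCast]
    rfl
  have hbest :
      (PySem.List.pyRange 0 ((nums.length : Int)) 1).foldl
          (fun (best : Int) i =>
            if PySem.List.pyGetD (finArr nums.length (incF nums) nums.length) i 0 > 1 ∧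
                PySem.List.pyGetD (backArr nums.length (decF nums) nums.length) i 0 > 1 then
              max best
                (PySem.List.pyGetD (finArr nums.length (incF nums) nums.length) i 0 +
                  PySem.List.pyGetD (backArr nums.length (decF nums) nums.length) i 0 - 1)
            else best) 1 =
        maxCombine nums := by
    rw [PySem.List.pyRange_zero_natCast, List.foldl_map]
    unfold maxCombine
    apply PySem.List.foldl_congr_mem'
    intro i hi acc
    have hin := List.mem_range.mp hi
    simp only [PySem.List.pyGetD_natCast]
    rw [finArr_getD _ _ _ _ hin, if_pos hin, backArr_getD _ _ _ _ hin,
        if_pos (show nums.length - nums.length ≤ i by omega)]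
  simp only [minimumMountainRemovals_alt_alt]
  rw [hinc, hdec, hbest]

-- ===== VERDICT (by name: the statement is the Claim_ definition above) =====
theorem minimumMountainRemovals_alt_spec : Claim_equal_minimumMountainRemovals_alt := by
  intro nums _ hpre
  unfold Spec_minimumMountainRemovals_alt
  rw [portA_eq nums hpre, portB_eq nums, max_dp2_eq_maxCombine nums hpre]
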